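-- pv_equiv track=rewrite | github.com/Liebestraum1/problem-solving | Programmers/Level_2/위장.py | solution
-- ===== SOURCE A (Python) =====
-- def solution(clothes):
--     dic = {}
--     answer = 1
--     for v, k in clothes:
--         dic[k] = dic.get(k, 0) + 1
--
--     for i in dic.values():
--         answer *= (i + 1)
--     return answer - 1
-- ===== SOURCE B (Python) =====
-- def solution(clothes):
--     cats = sorted(k for _, k in clothes)
--
--     def prod_runs(lst):
--         if not lst:
--             return 1
--         head = lst[0]
--         n = 1
--         while n < len(lst) and lst[n] == head:
--             n += 1
--         return (n + 1) * prod_runs(lst[n:])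
--
--     return prod_runs(cats) - 1
-- ===== Notes on version B (the rewrite author's own statement) =====
-- stated objective: alternative
-- what changed: Replaces A's dictionary-of-counts (hash counting, then a product over dict values) by sorting the category list and multiplying (run length + 1) over maximal runs of equal consecutive categories, computed by a recursive run-splitting scan.
import Mathlib
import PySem

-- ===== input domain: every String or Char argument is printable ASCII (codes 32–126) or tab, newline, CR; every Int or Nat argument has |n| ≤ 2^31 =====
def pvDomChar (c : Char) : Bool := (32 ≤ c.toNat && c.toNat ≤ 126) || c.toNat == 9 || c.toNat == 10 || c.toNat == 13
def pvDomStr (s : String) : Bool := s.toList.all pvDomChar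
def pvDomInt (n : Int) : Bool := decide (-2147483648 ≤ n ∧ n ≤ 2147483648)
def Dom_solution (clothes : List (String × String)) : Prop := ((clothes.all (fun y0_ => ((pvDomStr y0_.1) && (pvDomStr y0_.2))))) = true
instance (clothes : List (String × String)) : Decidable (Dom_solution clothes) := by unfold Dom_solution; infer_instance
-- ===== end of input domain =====

-- B replaces A's hash-dictionary counting by a sort-then-scan over consecutive runs of equal
-- categories (alternative decomposition; not claimed faster).

-- ===== PORT A =====
-- dic = {}; for v, k in clothes: dic[k] = dic.get(k, 0) + 1; answer = 1; for i in dic.values(): answer *= i + 1; return answer - 1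
def solution (clothes : List (String × String)) : Int :=
  let dic := clothes.foldl (fun d vk => d.insert vk.2 (d.getD vk.2 0 + 1)) PySem.Dict.empty
  let answer := dic.values.foldl (fun answer i => answer * (i + 1)) (1 : Int)
  answer - 1

-- ===== PORT B =====
-- prod_runs(lst): empty -> 1; else n = 1 + length of the front run equal to lst[0], return (n+1) * prod_runs(lst[n:])
def pvProdRuns : List String → Int
  | [] => 1
  | x :: rest =>
    let n : Nat := 1 + (rest.takeWhile (fun y => y == x)).length
    ((n : Int) + 1) * pvProdRuns (rest.dropWhile (fun y => y == x))
termination_by l => l.length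
decreasing_by simpa using Nat.lt_succ_of_le (List.length_dropWhile_le _ rest)

def solution_alt (clothes : List (String × String)) : Int :=
  let cats := PySem.List.sorted (clothes.map (fun p => p.2)) (fun x => x) false
  pvProdRuns cats - 1

-- ===== PRECONDITION & SPEC =====
def Spec_solution (clothes : List (String × String)) (out : Int) : Prop := out = solution_alt clothes
instance (clothes : List (String × String)) (out : Int) : Decidable (Spec_solution clothes out) := by unfold Spec_solution; infer_instance

-- ===== CLAIM (what is proved, stated in full; the proofs are below) =====
def Claim_equal_solution : Prop := ∀ (clothes : List (String × String)), Dom_solution clothes → Spec_solution clothes (solution clothes)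

-- ===== LEMMAS AND PROOFS =====

-- A's product loop as List.prod
lemma pv_foldl_mul (l : List Int) (a : Int) :
    l.foldl (fun answer i => answer * (i + 1)) a = a * (l.map (fun i => i + 1)).prod := by
  induction l generalizing a with
  | nil => simp
  | cons i t ih => simp [List.foldl_cons, ih, mul_assoc]

-- dedup of a list that starts with a run of x's, with x absent afterwards
lemma pv_ofList_run (x : String) (tw t : List String)
    (htw : ∀ y ∈ tw, y = x) (hxt : x ∉ t) :
    PySem.Set.ofList (x :: (tw ++ t)) = x :: PySem.Set.ofList t := by
  rw [PySem.Set.ofList_cons]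
  congr 1
  induction tw with
  | nil =>
    unfold PySem.Set.discard
    refine List.filter_eq_self.mpr ?_
    intro a ha
    have : a ≠ x := fun h => hxt (h ▸ (PySem.Set.mem_ofList _ _).mp ha)
    simpa using this
  | cons y tw' ih =>
    have hy : y = x := htw y (by simp)
    subst hy
    rw [List.cons_append, PySem.Set.ofList_cons]
    unfold PySem.Set.discard
    simp only [List.filter_cons, beq_self_eq_true, Bool.not_true, Bool.false_eq_true,
      if_false, List.filter_filter]
    have : ∀ p : String → Bool, List.filter (fun a => p a && p a) = List.filter p := by
      intro p; funext l; congr 1; funext a; exact Bool.and_self _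
    rw [this]
    exact ih (fun z hz => htw z (by simp [hz]))

-- the run product of a sorted list is the product of (count k + 1) over its distinct elements
lemma pv_prodRuns_sorted : ∀ (n : Nat) (s : List String), s.length ≤ n →
    s.Pairwise (· ≤ ·) →
    pvProdRuns s = ((PySem.Set.ofList s).map (fun k => ((s.count k : Int) + 1))).prod := by
  intro n
  induction n with
  | zero =>
    intro s hs _
    have : s = [] := List.eq_nil_of_length_eq_zero (Nat.le_zero.mp hs)
    subst this; simp [pvProdRuns, PySem.Set.ofList]
  | succ n ih =>
    intro s hs hp
    cases s with
    | nil => simp [pvProdRuns, PySem.Set.ofList]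
    | cons x rest =>
      have hxle : ∀ y ∈ rest, x ≤ y := (List.pairwise_cons.mp hp).1
      have hrest : rest.Pairwise (· ≤ ·) := (List.pairwise_cons.mp hp).2
      set tw := rest.takeWhile (fun y => y == x) with htw_def
      set t := rest.dropWhile (fun y => y == x) with ht_def
      have hsplit : tw ++ t = rest := List.takeWhile_append_dropWhile
      have htw : ∀ y ∈ tw, y = x := by
        intro y hy
        have := List.mem_takeWhile_imp hy
        exact beq_iff_eq.mp this
      have ht_pair : t.Pairwise (· ≤ ·) := hrest.sublist (List.dropWhile_sublist _)
      have hxt : x ∉ t := by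
        cases ht : t with
        | nil => simp
        | cons h0 t' =>
          rw [ht_def] at ht
          have hhead := List.head_dropWhile_not (fun y => y == x) (l := rest) (by simp [ht])
          have hh0x : h0 ≠ x := by simpa [ht] using hhead
          have hh0mem : h0 ∈ rest := (List.dropWhile_sublist (fun y => y == x)).mem
            (show h0 ∈ rest.dropWhile (fun y => y == x) by rw [ht]; exact List.mem_cons_self ..)
          rw [ht_def, ht] at ht_pair
          have hxh0 : x ≤ h0 := hxle _ hh0mem
          intro hx
          rcases List.mem_cons.mp hx with h | h
          · exact hh0x h.symm
          · have hpair := List.pairwise_cons.mp ht_pair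
            have : h0 ≤ x := hpair.1 x h
            exact hh0x (le_antisymm this hxh0)
      have htwcount : tw.count x = tw.length := List.count_eq_length.mpr (fun b hb => (htw b hb).symm)
      have htcount : t.count x = 0 := List.count_eq_zero.mpr hxt
      have hcount_ne : ∀ k, k ≠ x → (x :: rest).count k = t.count k := by
        intro k hk
        rw [List.count_cons, ← hsplit, List.count_append]
        have : tw.count k = 0 := List.count_eq_zero.mpr (fun hmem => hk (htw k hmem))
        simp [this, Ne.symm hk]
      have hded : PySem.Set.ofList (x :: rest) = x :: PySem.Set.ofList t := by
        rw [← hsplit]; exact pv_ofList_run x tw t htw hxt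
      have hcx : (x :: rest).count x = tw.length + 1 := by
        rw [List.count_cons, ← hsplit, List.count_append, htwcount, htcount]
        simp
      have hlt : t.length ≤ n := by
        have h1 : t.length ≤ rest.length := List.length_dropWhile_le _ rest
        have h2 : rest.length ≤ n := by simpa using Nat.succ_le_succ_iff.mp hs
        omega
      have hih := ih t hlt ht_pair
      rw [pvProdRuns, hded]
      simp only [List.map_cons, List.prod_cons]
      rw [hcx]
      have hmap : (PySem.Set.ofList t).map (fun k => (((x :: rest).count k : Int) + 1))
          = (PySem.Set.ofList t).map (fun k => ((t.count k : Int) + 1)) := by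
        apply List.map_congr_left
        intro k hk
        have hkt : k ∈ t := (PySem.Set.mem_ofList _ _).mp hk
        have hkx : k ≠ x := fun h => hxt (h ▸ hkt)
        rw [hcount_ne k hkx]
      rw [hmap, ← hih]
      push_cast
      ring

-- A's side reduced to the same product over distinct categories
lemma pv_solution_eq (clothes : List (String × String)) :
    solution clothes =
      ((PySem.Set.ofList (clothes.map (fun p => p.2))).map
        (fun k => (((clothes.map (fun p => p.2)).count k : Int) + 1))).prod - 1 := by
  rw [show solution clothes = ((clothes.foldl (fun d vk => d.insert vk.2 (d.getD vk.2 0 + 1)) PySem.Dict.empty).values.foldl (fun answer i => answer * (i + 1)) (1 : Int)) - 1 from rfl]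
  have hfold : clothes.foldl (fun d vk => d.insert vk.2 (d.getD vk.2 0 + 1)) PySem.Dict.empty
      = PySem.Dict.counter (clothes.map (fun p => p.2)) := by
    rw [← PySem.Dict.foldl_insert_getD_add_one_eq_counter, List.foldl_map]
  rw [hfold]
  have hvals : (PySem.Dict.counter (clothes.map (fun p => p.2))).values
      = (PySem.Set.ofList (clothes.map (fun p => p.2))).map
          (fun k => ((clothes.map (fun p => p.2)).count k : Int)) := by
    show (PySem.Dict.counter (clothes.map (fun p => p.2))).items.map (·.2) = _
    rw [PySem.Dict.items_counter, List.map_map]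
    rfl
  rw [hvals, pv_foldl_mul, List.map_map]
  rw [one_mul]
  rfl

-- ===== VERDICT (by name: the statement is the Claim_ definition above) =====
theorem solution_spec : Claim_equal_solution := by
  intro clothes _
  show solution clothes = solution_alt clothes
  rw [show solution_alt clothes = pvProdRuns (PySem.List.sorted (clothes.map (fun p => p.2)) (fun x => x) false) - 1 from rfl]
  set ks := clothes.map (fun p => p.2) with hks
  set s := PySem.List.sorted ks (fun x => x) false with hs
  have hperm : s.Perm ks := PySem.List.sorted_perm ks (fun x => x) false
  have hpair : s.Pairwise (· ≤ ·) := PySem.List.sorted_pairwise ks (fun x => x)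
  rw [pv_solution_eq, pv_prodRuns_sorted s.length s le_rfl hpair]
  congr 1
  have hcnt : ∀ k, s.count k = ks.count k := fun k => hperm.count_eq k
  have h1 : (PySem.Set.ofList s).map (fun k => ((s.count k : Int) + 1))
      = (PySem.Set.ofList s).map (fun k => ((ks.count k : Int) + 1)) := by
    apply List.map_congr_left; intro k _; rw [hcnt k]
  have hpermset : (PySem.Set.ofList ks).Perm (PySem.Set.ofList s) := by
    rw [List.perm_ext_iff_of_nodup (PySem.Set.nodup_ofList _) (PySem.Set.nodup_ofList _)]
    intro a
    rw [PySem.Set.mem_ofList, PySem.Set.mem_ofList, hperm.mem_iff]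
  rw [h1]
  exact (hpermset.map (fun k => ((ks.count k : Int) + 1))).prod_eq
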